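-- pv_equiv track=rewrite | github.com/richardcui18/sequential-privacy-attacks | code/data_market/load_dataset.py | generate_possible_pi_states_given_interval
-- ===== SOURCE A (Python) =====
-- from itertools import combinations
--
-- def generate_possible_pi_states_given_interval(unique_values_on_each_dimension, max_size, min_size):
--     def get_subsets(dim, current_subset, current_size):
--         if dim == len(unique_values_on_each_dimension):
--             if min_size <= current_size <= max_size:
--                 result.append(current_subset)
--             return
--
--         for size in range(1, len(unique_values_on_each_dimension[dim]) + 1):
--             for combination in combinations(unique_values_on_each_dimension[dim], size):
--                 new_size = current_size * size
--                 if new_size <= max_size: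
--                     get_subsets(dim + 1, current_subset + [list(combination)], new_size)
--
--     result = []
--     get_subsets(0, [], 1)
--     return result
-- ===== SOURCE B (Python) =====
-- from itertools import combinations, product
--
-- def generate_possible_pi_states_given_interval(unique_values_on_each_dimension, max_size, min_size):
--     per_dim = [[list(c) for size in range(1, len(dim) + 1) for c in combinations(dim, size)]
--                for dim in unique_values_on_each_dimension]
--     result = []
--     for combo in product(*per_dim):
--         prod_size = 1
--         for s in combo:
--             prod_size *= len(s)
--         if min_size <= prod_size <= max_size:
--             result.append(list(combo))
--     return result
-- ===== Notes on version B (the rewrite author's own statement) =====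
-- stated objective: alternative
-- what changed: Replaced A's pruned recursive DFS with accumulator mutation by a flat enumeration: precompute every dimension's subset list once, iterate itertools.product over them, and keep tuples whose product of lengths lies in [min_size, max_size].
import Mathlib
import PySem

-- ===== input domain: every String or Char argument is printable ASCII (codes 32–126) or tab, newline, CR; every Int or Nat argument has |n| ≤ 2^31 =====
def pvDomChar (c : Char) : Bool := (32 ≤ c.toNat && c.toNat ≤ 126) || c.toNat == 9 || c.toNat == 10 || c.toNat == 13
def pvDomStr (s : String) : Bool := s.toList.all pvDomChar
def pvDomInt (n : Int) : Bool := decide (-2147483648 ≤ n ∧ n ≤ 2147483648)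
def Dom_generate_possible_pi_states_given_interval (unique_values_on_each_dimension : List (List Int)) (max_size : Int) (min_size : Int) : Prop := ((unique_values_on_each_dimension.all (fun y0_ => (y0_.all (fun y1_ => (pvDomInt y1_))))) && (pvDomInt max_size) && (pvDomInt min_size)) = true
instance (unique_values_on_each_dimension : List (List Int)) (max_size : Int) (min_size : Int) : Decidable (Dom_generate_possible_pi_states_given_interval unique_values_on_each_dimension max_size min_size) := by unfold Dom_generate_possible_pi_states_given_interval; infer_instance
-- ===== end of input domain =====

-- B replaces A's pruned recursive DFS by precomputed per-dimension subset lists + a flat product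
-- enumeration filtered by the product of lengths (alternative decomposition, same results and order).

-- itertools.combinations(l, k) in Python's order (shared library helper for both ports)
def pyCombinations (l : List Int) (k : Nat) : List (List Int) :=
  match k, l with
  | 0, _ => [[]]
  | _ + 1, [] => []
  | k + 1, x :: xs => (pyCombinations xs k).map (x :: ·) ++ pyCombinations xs (k + 1)

-- ===== PORT A =====
-- A's get_subsets: recursion over the remaining dimensions (A's `dim` index walks the list),
-- result accumulation rendered as the concatenation of the appends in DFS order.
def getSubsetsA (max_size min_size : Int) : List (List Int) → List (List Int) → Int → List (List (List Int))
  | [], current_subset, current_size =>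
    if min_size ≤ current_size ∧ current_size ≤ max_size then [current_subset] else []
  | d :: rest, current_subset, current_size =>
    (List.range d.length).flatMap (fun i =>
      (pyCombinations d (i + 1)).flatMap (fun c =>
        let new_size := current_size * ((i : Int) + 1)
        if new_size ≤ max_size then
          getSubsetsA max_size min_size rest (current_subset ++ [c]) new_size
        else []))

def generate_possible_pi_states_given_interval (unique_values_on_each_dimension : List (List Int)) (max_size : Int) (min_size : Int) : List (List (List Int)) :=
  getSubsetsA max_size min_size unique_values_on_each_dimension [] 1

-- ===== PORT B =====
-- all nonempty subsets of one dimension, sizes 1..len, combinations order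
def subsetsB (dim : List Int) : List (List Int) :=
  (List.range dim.length).flatMap (fun i => pyCombinations dim (i + 1))

-- itertools.product over a list of lists (leftmost varies slowest)
def pyProduct : List (List (List Int)) → List (List (List Int))
  | [] => [[]]
  | l :: rest => l.flatMap (fun x => (pyProduct rest).map (x :: ·))

def generate_possible_pi_states_given_interval_alt (unique_values_on_each_dimension : List (List Int)) (max_size : Int) (min_size : Int) : List (List (List Int)) :=
  (pyProduct (unique_values_on_each_dimension.map subsetsB)).filter (fun combo =>
    let prod_size := combo.foldl (fun acc s => acc * (s.length : Int)) 1
    decide (min_size ≤ prod_size ∧ prod_size ≤ max_size))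

-- ===== PRECONDITION & SPEC =====
def Spec_generate_possible_pi_states_given_interval (unique_values_on_each_dimension : List (List Int)) (max_size : Int) (min_size : Int) (out : List (List (List Int))) : Prop := out = generate_possible_pi_states_given_interval_alt unique_values_on_each_dimension max_size min_size
instance (unique_values_on_each_dimension : List (List Int)) (max_size : Int) (min_size : Int) (out : List (List (List Int))) : Decidable (Spec_generate_possible_pi_states_given_interval unique_values_on_each_dimension max_size min_size out) := by unfold Spec_generate_possible_pi_states_given_interval; infer_instance

-- ===== CLAIM (what is proved, stated in full; the proofs are below) =====
def Claim_equal_generate_possible_pi_states_given_interval : Prop := ∀ (unique_values_on_each_dimension : List (List Int)) (max_size : Int) (min_size : Int), Dom_generate_possible_pi_states_given_interval unique_values_on_each_dimension max_size min_size → Spec_generate_possible_pi_states_given_interval unique_values_on_each_dimension max_size min_size (generate_possible_pi_states_given_interval unique_values_on_each_dimension max_size min_size)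

-- ===== LEMMAS AND PROOFS =====

-- product of lengths, the quantity B's fold computes
def prodLen (combo : List (List Int)) : Int := (combo.map (fun s => (s.length : Int))).prod

theorem foldl_len_eq (combo : List (List Int)) (a : Int) :
    combo.foldl (fun acc s => acc * (s.length : Int)) a = a * prodLen combo := by
  induction combo generalizing a with
  | nil => simp [prodLen]
  | cons s t ih => simp [prodLen, List.foldl_cons, ih, List.prod_cons] at *; ring

theorem length_of_mem_pyCombinations (k : Nat) (l s : List Int)
    (h : s ∈ pyCombinations l k) : s.length = k := by
  induction l generalizing k s with
  | nil =>
    cases k with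
    | zero => simp [pyCombinations] at h; simp [h]
    | succ k => simp [pyCombinations] at h
  | cons x xs ih =>
    cases k with
    | zero => simp [pyCombinations] at h; simp [h]
    | succ k =>
      simp [pyCombinations] at h
      rcases h with ⟨t, ht, rfl⟩ | h
      · simp [ih k t ht]
      · exact ih (k + 1) s h

theorem prodLen_pos (ls : List (List Int)) (t : List (List Int))
    (h : t ∈ pyProduct (ls.map subsetsB)) : 1 ≤ prodLen t := by
  induction ls generalizing t with
  | nil =>
    simp [pyProduct] at h; simp [h, prodLen]
  | cons d rest ih =>
    simp [pyProduct, List.mem_flatMap] at h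
    rcases h with ⟨s, hs, t', ht', rfl⟩
    simp [subsetsB, List.mem_flatMap] at hs
    rcases hs with ⟨i, _, hsi⟩
    have hlen := length_of_mem_pyCombinations (i + 1) d s hsi
    have h1 : (1 : Int) ≤ (s.length : Int) := by omega
    have h2 := ih t' ht'
    simp [prodLen, List.prod_cons] at *
    nlinarith

theorem flatMap_congr_mem {α β : Type} (l : List α) (f g : α → List β)
    (h : ∀ x ∈ l, f x = g x) : l.flatMap f = l.flatMap g := by
  induction l with
  | nil => rfl
  | cons a t ih =>
    simp [List.flatMap_cons, h a (by simp), ih (fun x hx => h x (by simp [hx]))]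

theorem getSubsetsA_eq (max_size min_size : Int) (rest : List (List Int))
    (cur : List (List Int)) (sz : Int) (hsz : 1 ≤ sz) :
    getSubsetsA max_size min_size rest cur sz =
      ((pyProduct (rest.map subsetsB)).filter (fun t =>
        decide (min_size ≤ sz * prodLen t ∧ sz * prodLen t ≤ max_size))).map (cur ++ ·) := by
  induction rest generalizing cur sz with
  | nil =>
    simp only [getSubsetsA, List.map_nil, pyProduct]
    by_cases h : min_size ≤ sz ∧ sz ≤ max_size
    · rw [if_pos h]
      simp [prodLen, h.1, h.2]
    · rw [if_neg h]
      have hnil : List.filter (fun t => decide (min_size ≤ sz * prodLen t ∧ sz * prodLen t ≤ max_size)) [[]] = [] := by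
        rw [List.filter_eq_nil_iff]
        intro t ht
        simp only [List.mem_singleton] at ht
        subst ht
        simp only [prodLen, List.map_nil, List.prod_nil, mul_one, decide_eq_true_eq]
        omega
      rw [hnil, List.map_nil]
  | cons d rest ih =>
    have hmap : (d :: rest).map subsetsB = subsetsB d :: rest.map subsetsB := rfl
    rw [hmap]
    simp only [getSubsetsA, pyProduct, subsetsB, List.flatMap_assoc, List.filter_flatMap,
      List.map_flatMap]
    apply flatMap_congr_mem
    intro i _
    apply flatMap_congr_mem
    intro c hc
    have hclen : c.length = i + 1 := length_of_mem_pyCombinations (i + 1) d c hc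
    have hi1 : (1 : Int) ≤ (i : Int) + 1 := by omega
    have hfm : ∀ t, prodLen (c :: t) = ((i : Int) + 1) * prodLen t := by
      intro t; simp only [prodLen, List.map_cons, List.prod_cons, hclen]; push_cast; ring
    by_cases hle : sz * ((i : Int) + 1) ≤ max_size
    · simp only [hle, if_pos]
      rw [ih (cur ++ [c]) (sz * ((i : Int) + 1)) (by nlinarith)]
      rw [List.filter_map, List.map_map]
      have hfun : ((fun x => cur ++ x) ∘ fun x => c :: x) = (fun x => cur ++ [c] ++ x) := by
        funext t; simp [Function.comp, List.append_assoc]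
      rw [hfun]
      apply congrArg
      apply List.filter_congr
      intro t _
      simp only [Function.comp_apply, hfm t, mul_assoc]
    · simp only [hle, if_neg, not_false_iff]
      symm
      rw [List.filter_map]
      have hnil : List.filter ((fun t => decide (min_size ≤ sz * prodLen t ∧ sz * prodLen t ≤ max_size)) ∘ fun x => c :: x) (pyProduct (List.map subsetsB rest)) = [] := by
        rw [List.filter_eq_nil_iff]
        intro t ht
        have hp := prodLen_pos rest t ht
        simp only [Function.comp_apply, hfm t, decide_eq_true_eq, not_and, not_le]
        intro _
        have h3 : (1 : Int) ≤ sz * ((i : Int) + 1) := by nlinarith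
        have h4 : sz * ((i : Int) + 1) * 1 ≤ sz * ((i : Int) + 1) * prodLen t :=
          mul_le_mul_of_nonneg_left hp (by linarith)
        rw [mul_one, mul_assoc] at h4
        linarith [not_le.mp hle]
      rw [hnil]
      rfl

-- ===== VERDICT (by name: the statement is the Claim_ definition above) =====
theorem generate_possible_pi_states_given_interval_spec : Claim_equal_generate_possible_pi_states_given_interval := by
  intro dims max_size min_size _
  unfold Spec_generate_possible_pi_states_given_interval
  unfold generate_possible_pi_states_given_interval generate_possible_pi_states_given_interval_alt
  rw [getSubsetsA_eq max_size min_size dims [] 1 le_rfl]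
  simp [foldl_len_eq]
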